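-- pv_equiv track=rewrite | github.com/ConnectedReasoning/GenMuso | genmuso/music/scales.py | chord_tones
-- ===== SOURCE A (Python) =====
-- MODES = {
--     # Diatonic modes
--     'major':                [0, 2, 4, 5, 7, 9, 11],
--     'minor':                [0, 2, 3, 5, 7, 8, 10],
--     'dorian':               [0, 2, 3, 5, 7, 9, 10],
--     'phrygian':             [0, 1, 3, 5, 7, 8, 10],
--     'lydian':               [0, 2, 4, 6, 7, 9, 11],
--     'mixolydian':           [0, 2, 4, 5, 7, 9, 10],
--     'aeolian':              [0, 2, 3, 5, 7, 8, 10],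
--     'locrian':              [0, 1, 3, 5, 6, 8, 10],
--
--     # Pentatonic
--     'pentatonic_major':     [0, 2, 4, 7, 9],
--     'pentatonic_minor':     [0, 3, 5, 7, 10],
--
--     # Harmonic / melodic
--     'harmonic_minor':       [0, 2, 3, 5, 7, 8, 11],
--     'melodic_minor':        [0, 2, 3, 5, 7, 9, 11],
--
--     # Exotic
--     'arabic_double_harmonic': [0, 1, 4, 5, 7, 8, 11],
--     'whole_tone':           [0, 2, 4, 6, 8, 10],
--     'blues':                [0, 3, 5, 6, 7, 10],
--     'japanese':             [0, 1, 5, 7, 8],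
--     'hungarian_minor':      [0, 2, 3, 6, 7, 8, 11],
-- }
--
-- def chord_tones(root_pc: int, mode: str, degree: int = 1,
--                 low: int = 36, high: int = 84) -> list[int]:
--     """
--     Build triad tones from a scale degree (1-indexed).
--
--     The chord quality (major/minor/diminished) emerges naturally from
--     the scale — no hard-coded major triads.  This fixes GenMuso's bug
--     where chords were always major regardless of mode.
--
--     Returns MIDI notes in [low, high] that belong to the triad.
--     """
--     intervals = MODES[mode]
--     pc = root_pc % 12
--     n = len(intervals)
--     idx = (degree - 1) % n
--
--     # Triad = root, third, fifth of the scale built on this degree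
--     triad_pcs = set()
--     for offset in (0, 2, 4):
--         triad_pcs.add((pc + intervals[(idx + offset) % n]) % 12)
--
--     return [m for m in range(low, high + 1) if m % 12 in triad_pcs]
-- ===== SOURCE B (Python) =====
-- MODES = {
--     'major':                [0, 2, 4, 5, 7, 9, 11],
--     'minor':                [0, 2, 3, 5, 7, 8, 10],
--     'dorian':               [0, 2, 3, 5, 7, 9, 10],
--     'phrygian':             [0, 1, 3, 5, 7, 8, 10],
--     'lydian':               [0, 2, 4, 6, 7, 9, 11],
--     'mixolydian':           [0, 2, 4, 5, 7, 9, 10],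
--     'aeolian':              [0, 2, 3, 5, 7, 8, 10],
--     'locrian':              [0, 1, 3, 5, 6, 8, 10],
--     'pentatonic_major':     [0, 2, 4, 7, 9],
--     'pentatonic_minor':     [0, 3, 5, 7, 10],
--     'harmonic_minor':       [0, 2, 3, 5, 7, 8, 11],
--     'melodic_minor':        [0, 2, 3, 5, 7, 9, 11],
--     'arabic_double_harmonic': [0, 1, 4, 5, 7, 8, 11],
--     'whole_tone':           [0, 2, 4, 6, 8, 10],
--     'blues':                [0, 3, 5, 6, 7, 10],
--     'japanese':             [0, 1, 5, 7, 8],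
--     'hungarian_minor':      [0, 2, 3, 6, 7, 8, 11],
-- }
--
-- def chord_tones(root_pc: int, mode: str, degree: int = 1,
--                 low: int = 36, high: int = 84) -> list[int]:
--     """Generate the triad notes directly per pitch class, then sort the merge."""
--     intervals = MODES[mode]
--     n = len(intervals)
--     idx = (degree - 1) % n
--     triad_pcs = {(root_pc + intervals[(idx + o) % n]) % 12 for o in (0, 2, 4)}
--     notes = []
--     for p in sorted(triad_pcs):
--         notes += list(range(low + (p - low) % 12, high + 1, 12))
--     return sorted(notes)
-- ===== Notes on version B (the rewrite author's own statement) =====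
-- stated objective: alternative
-- what changed: Instead of scanning every MIDI note in [low, high] and filtering by triad-set membership, B jumps per triad pitch class to the first note >= low via modular arithmetic, generates that class's notes with range(first, high+1, 12), and sorts the merged lists; the triad set itself is built by a set comprehension without pre-reducing root_pc mod 12.
import Mathlib
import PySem

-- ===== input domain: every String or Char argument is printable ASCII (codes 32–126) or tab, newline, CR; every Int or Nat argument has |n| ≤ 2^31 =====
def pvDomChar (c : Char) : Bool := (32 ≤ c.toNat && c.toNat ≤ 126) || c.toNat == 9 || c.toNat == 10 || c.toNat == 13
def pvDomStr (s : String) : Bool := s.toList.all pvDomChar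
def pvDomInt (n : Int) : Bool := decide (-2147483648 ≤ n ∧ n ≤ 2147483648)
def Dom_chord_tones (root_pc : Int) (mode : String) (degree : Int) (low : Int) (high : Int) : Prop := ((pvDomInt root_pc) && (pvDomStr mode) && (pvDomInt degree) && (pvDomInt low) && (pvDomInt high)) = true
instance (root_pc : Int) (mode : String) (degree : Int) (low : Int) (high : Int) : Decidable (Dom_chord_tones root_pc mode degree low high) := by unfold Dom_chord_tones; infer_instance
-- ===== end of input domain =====

-- B replaces A's scan-and-filter over the whole range [low, high] by direct generation:
-- per triad pitch class it jumps to the first note ≥ low by modular arithmetic, takes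
-- range(first, high+1, 12), and sorts the merged result.

-- ===== PORT A =====
-- the module-level MODES dict, shared context of both Pythons
def pvModes : PySem.Dict String (List Int) := PySem.Dict.ofList [
  ("major",                [0, 2, 4, 5, 7, 9, 11]),
  ("minor",                [0, 2, 3, 5, 7, 8, 10]),
  ("dorian",               [0, 2, 3, 5, 7, 9, 10]),
  ("phrygian",             [0, 1, 3, 5, 7, 8, 10]),
  ("lydian",               [0, 2, 4, 6, 7, 9, 11]),
  ("mixolydian",           [0, 2, 4, 5, 7, 9, 10]),
  ("aeolian",              [0, 2, 3, 5, 7, 8, 10]),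
  ("locrian",              [0, 1, 3, 5, 6, 8, 10]),
  ("pentatonic_major",     [0, 2, 4, 7, 9]),
  ("pentatonic_minor",     [0, 3, 5, 7, 10]),
  ("harmonic_minor",       [0, 2, 3, 5, 7, 8, 11]),
  ("melodic_minor",        [0, 2, 3, 5, 7, 9, 11]),
  ("arabic_double_harmonic", [0, 1, 4, 5, 7, 8, 11]),
  ("whole_tone",           [0, 2, 4, 6, 8, 10]),
  ("blues",                [0, 3, 5, 6, 7, 10]),
  ("japanese",             [0, 1, 5, 7, 8]),
  ("hungarian_minor",      [0, 2, 3, 6, 7, 8, 11])]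

-- A's 'triad_pcs = set(); for offset in (0, 2, 4): triad_pcs.add(...)' loop
def pvTriadA (root_pc : Int) (degree : Int) (intervals : List Int) : PySem.Set Int :=
  let pc := PySem.Int.mod root_pc 12
  let n : Int := (intervals.length : Int)
  let idx := PySem.Int.mod (degree - 1) n
  ([0, 2, 4] : List Int).foldl
    (fun s off => PySem.Set.add s
      (PySem.Int.mod (pc + PySem.List.pyGetD intervals (PySem.Int.mod (idx + off) n) 0) 12))
    PySem.Set.empty

def chord_tones (root_pc : Int) (mode : String) (degree : Int) (low : Int) (high : Int) : List Int :=
  match PySem.Dict.get? pvModes mode with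
  | none => []  -- Python raises KeyError here; excluded by Pre_chord_tones
  | some intervals =>
    let triad_pcs := pvTriadA root_pc degree intervals
    (PySem.List.pyRange low (high + 1) 1).foldl
      (fun acc m => if PySem.Set.contains triad_pcs (PySem.Int.mod m 12) then acc ++ [m] else acc) []


-- ===== PORT B =====
def chord_tones_alt (root_pc : Int) (mode : String) (degree : Int) (low : Int) (high : Int) : List Int :=
  match PySem.Dict.get? pvModes mode with
  | none => []  -- Python raises KeyError here; excluded by Pre_chord_tones
  | some intervals =>
    let n : Int := (intervals.length : Int)
    let idx := PySem.Int.mod (degree - 1) n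
    -- '{(root_pc + intervals[(idx + o) % n]) % 12 for o in (0, 2, 4)}'
    let triad_pcs : PySem.Set Int :=
      PySem.Set.ofList (([0, 2, 4] : List Int).map (fun o =>
        PySem.Int.mod (root_pc + PySem.List.pyGetD intervals (PySem.Int.mod (idx + o) n) 0) 12))
    -- 'for p in sorted(triad_pcs): notes += list(range(low + (p - low) % 12, high + 1, 12))'
    let notes := (PySem.List.sorted triad_pcs (fun x => x) false).foldl
      (fun notes p => notes ++ PySem.List.pyRange (low + PySem.Int.mod (p - low) 12) (high + 1) 12) []
    PySem.List.sorted notes (fun x => x) false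


-- ===== PRECONDITION & SPEC =====
-- Pre_ excludes exactly the mode strings absent from MODES, on which Python A raises KeyError.
def Pre_chord_tones (root_pc : Int) (mode : String) (degree : Int) (low : Int) (high : Int) : Prop :=
  (PySem.Dict.get? pvModes mode).isSome = true
instance (root_pc : Int) (mode : String) (degree : Int) (low : Int) (high : Int) : Decidable (Pre_chord_tones root_pc mode degree low high) := by unfold Pre_chord_tones; infer_instance
def pvWitness_chord_tones : Int × String × Int × Int × Int := (0, "major", 1, 36, 84)

def Spec_chord_tones (root_pc : Int) (mode : String) (degree : Int) (low : Int) (high : Int) (out : List Int) : Prop := out = chord_tones_alt root_pc mode degree low high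
instance (root_pc : Int) (mode : String) (degree : Int) (low : Int) (high : Int) (out : List Int) : Decidable (Spec_chord_tones root_pc mode degree low high out) := by unfold Spec_chord_tones; infer_instance

-- ===== CLAIM (what is proved, stated in full; the proofs are below) =====
def Claim_equal_chord_tones : Prop := ∀ (root_pc : Int) (mode : String) (degree : Int) (low : Int) (high : Int), Dom_chord_tones root_pc mode degree low high → Pre_chord_tones root_pc mode degree low high → Spec_chord_tones root_pc mode degree low high (chord_tones root_pc mode degree low high)

-- ===== LEMMAS AND PROOFS =====

-- reducing root_pc mod 12 before the sum does not change the sum mod 12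
lemma mod12_add (a k : Int) :
    PySem.Int.mod (PySem.Int.mod a 12 + k) 12 = PySem.Int.mod (a + k) 12 := by
  rw [PySem.Int.mod_eq_emod_of_pos (by norm_num : (0:Int) < 12),
      PySem.Int.mod_eq_emod_of_pos (by norm_num : (0:Int) < 12),
      PySem.Int.mod_eq_emod_of_pos (by norm_num : (0:Int) < 12)]
  omega

-- A's add-loop and B's set comprehension build the same triad set
lemma triad_eq (root_pc degree : Int) (intervals : List Int) :
    pvTriadA root_pc degree intervals
      = PySem.Set.ofList (([0, 2, 4] : List Int).map (fun o =>
          PySem.Int.mod (root_pc + PySem.List.pyGetD intervals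
            (PySem.Int.mod (PySem.Int.mod (degree - 1) (intervals.length : Int) + o)
              (intervals.length : Int)) 0) 12)) := by
  unfold pvTriadA
  rw [PySem.Set.ofList_eq_foldl]
  simp only [List.map, List.foldl, mod12_add]
  rfl

lemma gen_pairwise (m high : Int) :
    (PySem.List.pyRange m high 12).Pairwise (· < ·) := by
  rw [PySem.List.pyRange_of_pos m high (by norm_num : (0:Int) < 12)]
  rw [List.pairwise_map]
  exact List.pairwise_lt_range.imp (by intro a b h; omega)

lemma gen_mem (low high p x : Int) (hp0 : 0 ≤ p) (hp12 : p < 12) :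
    x ∈ PySem.List.pyRange (low + PySem.Int.mod (p - low) 12) (high + 1) 12 ↔
      low ≤ x ∧ x ≤ high ∧ x % 12 = p := by
  rw [PySem.List.mem_pyRange_iff_of_pos (by norm_num : (0:Int) < 12),
      PySem.Int.mod_eq_emod_of_pos (by norm_num : (0:Int) < 12)]
  omega

lemma main_eq (S : PySem.Set Int) (hnd : S.Nodup) (hrng : ∀ p ∈ S, 0 ≤ p ∧ p < 12)
    (low high : Int) :
    PySem.List.sorted
      ((PySem.List.sorted S (fun x => x) false).foldl
        (fun acc p => acc ++ PySem.List.pyRange (low + PySem.Int.mod (p - low) 12) (high + 1) 12) [])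
      (fun x => x) false
    = (PySem.List.pyRange low (high + 1) 1).foldl
        (fun acc m => if PySem.Set.contains S (PySem.Int.mod m 12) then acc ++ [m] else acc) [] := by
  rw [PySem.List.foldl_append_eq_flatMap, PySem.List.foldl_append_if_eq_filter, List.nil_append,
    List.nil_append]
  set F := (PySem.List.pyRange low (high + 1) 1).filter
      (fun m => PySem.Set.contains S (PySem.Int.mod m 12)) with hF
  set gen := fun p => PySem.List.pyRange (low + PySem.Int.mod (p - low) 12) (high + 1) 12 with hgen
  have hFpw : F.Pairwise (· < ·) :=
    List.Pairwise.filter _ (PySem.List.pairwise_lt_pyRange_one low (high + 1))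
  have hmemS : ∀ p, p ∈ PySem.List.sorted S (fun x => x) false ↔ p ∈ S := by
    intro p; exact PySem.List.mem_sorted S (fun x => x) false p
  have hgenmem : ∀ p ∈ S, ∀ x, x ∈ gen p ↔ low ≤ x ∧ x ≤ high ∧ x % 12 = p := by
    intro p hp x; exact gen_mem low high p x (hrng p hp).1 (hrng p hp).2
  have hndN : ((PySem.List.sorted S (fun x => x) false).flatMap gen).Nodup := by
    rw [List.nodup_flatMap]
    constructor
    · intro p _
      exact ((gen_pairwise _ _).imp fun h => ne_of_lt h)
    · have hndS : (PySem.List.sorted S (fun x => x) false).Nodup :=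
        (PySem.List.sorted_perm S _ false).nodup_iff.mpr hnd
      refine hndS.imp_of_mem ?_
      intro p q hp hq hne x hxp hxq
      rw [hmemS] at hp hq
      have h1 := ((hgenmem p hp x).mp hxp).2.2
      have h2 := ((hgenmem q hq x).mp hxq).2.2
      exact hne (h1 ▸ h2 ▸ rfl)
  have hmem : ∀ x, x ∈ F ↔ x ∈ (PySem.List.sorted S (fun x => x) false).flatMap gen := by
    intro x
    rw [hF, List.mem_filter, List.mem_flatMap]
    rw [PySem.List.mem_pyRange_one]
    constructor
    · rintro ⟨⟨h1, h2⟩, hc⟩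
      have hcs : PySem.Int.mod x 12 ∈ S := (PySem.Set.contains_iff S _).mp hc
      refine ⟨PySem.Int.mod x 12, (hmemS _).mpr hcs, ?_⟩
      rw [hgenmem _ hcs x, PySem.Int.mod_eq_emod_of_pos (by norm_num : (0:Int) < 12)]
      omega
    · rintro ⟨p, hp, hx⟩
      rw [hmemS] at hp
      have := (hgenmem p hp x).mp hx
      refine ⟨⟨this.1, by omega⟩, (PySem.Set.contains_iff S _).mpr ?_⟩
      rw [PySem.Int.mod_eq_emod_of_pos (by norm_num : (0:Int) < 12), this.2.2]
      exact hp
  have hperm : F.Perm ((PySem.List.sorted S (fun x => x) false).flatMap gen) := by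
    have hndF : F.Nodup := hFpw.imp fun h => ne_of_lt h
    exact (List.perm_ext_iff_of_nodup hndF hndN).mpr hmem
  exact PySem.List.sorted_eq_of_perm_of_pairwise_lt _ F (fun x => x) hperm hFpw

lemma triad_nodup (root_pc degree : Int) (intervals : List Int) :
    (pvTriadA root_pc degree intervals).Nodup := by
  unfold pvTriadA
  simp only [List.foldl]
  exact PySem.Set.nodup_add _ _ (PySem.Set.nodup_add _ _ (PySem.Set.nodup_add _ _ List.nodup_nil))

lemma triad_range (root_pc degree : Int) (intervals : List Int) :
    ∀ p ∈ pvTriadA root_pc degree intervals, 0 ≤ p ∧ p < 12 := by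
  unfold pvTriadA
  intro p hp
  simp only [List.foldl, PySem.Set.mem_add] at hp
  have h12 : (0:Int) < 12 := by norm_num
  rcases hp with ((hp | hp) | hp) | hp
  · exact absurd hp (List.not_mem_nil)
  all_goals subst hp; exact ⟨PySem.Int.mod_nonneg _ h12, PySem.Int.mod_lt _ h12⟩

-- ===== VERDICT (by name: the statement is the Claim_ definition above) =====
theorem chord_tones_spec : Claim_equal_chord_tones := by
  intro root_pc mode degree low high _hdom hpre
  unfold Spec_chord_tones chord_tones chord_tones_alt
  unfold Pre_chord_tones at hpre
  cases hget : PySem.Dict.get? pvModes mode with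
  | none => simp [hget] at hpre
  | some intervals =>
    dsimp only
    rw [← triad_eq root_pc degree intervals]
    exact (main_eq (pvTriadA root_pc degree intervals)
      (triad_nodup root_pc degree intervals)
      (triad_range root_pc degree intervals) low high).symm
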